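-- pv_equiv track=rewrite | github.com/MAAREKANTONY/finance_momet_ch | core/services/backtesting/engine.py | _match_codes
-- ===== SOURCE A (Python) =====
-- from typing import Any
--
-- def _normalize_codes(value: Any) -> list[str]:
--     if value in (None, ""):
--         return []
--
--     def _append_token(out: list[str], raw: Any) -> None:
--         if raw in (None, ""):
--             return
--         text = str(raw).strip()
--         if not text:
--             return
--         parts = [part.strip().upper() for part in text.split(",")] if "," in text else [text.upper()]
--         for code in parts:
--             if code and code not in out:
--                 out.append(code)
--
--     if isinstance(value, str):
--         out: list[str] = []
--         _append_token(out, value)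
--         return out
--     if isinstance(value, (list, tuple, set)):
--         out: list[str] = []
--         for item in value:
--             _append_token(out, item)
--         return out
--     out: list[str] = []
--     _append_token(out, value)
--     return out
--
-- def _normalize_logic(value: Any, default: str) -> str:
--     logic = str(value or default).strip().upper()
--     return logic if logic in {"AND", "OR"} else default
--
-- def _match_codes(day_alerts: set[str], codes: list[str], logic: str = "AND") -> bool:
--     codes = _normalize_codes(codes)
--     if not codes:
--         return False
--     logic = _normalize_logic(logic, "AND")
--     if logic == "OR":
--         return any(code in day_alerts for code in codes)
--     return all(code in day_alerts for code in codes)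
-- ===== SOURCE B (Python) =====
-- def _match_codes(day_alerts, codes, logic="AND"):
--     # B: single streaming pass with short-circuit returns; no normalized code list,
--     # no dedup structure — tokens are tested the moment they are produced.
--     is_or = str(logic or "AND").strip().upper() == "OR"
--     seen = False
--     for raw in codes:
--         if raw in (None, ""):
--             continue
--         text = str(raw).strip()
--         if not text:
--             continue
--         parts = [p.strip().upper() for p in text.split(",")] if "," in text else [text.upper()]
--         for code in parts:
--             if not code:
--                 continue
--             seen = True
--             if (code in day_alerts) == is_or:
--                 return is_or
--     return bool(seen and not is_or)
-- ===== Notes on version B (the rewrite author's own statement) =====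
-- stated objective: faster
-- what changed: B replaces A's two-stage normalize-then-any/all design (build a deduplicated normalized code list, then scan it against day_alerts) by a single streaming pass that tests each token the moment it is produced and short-circuits with an early return, keeping only a 'seen a token' flag: the quadratic list-membership dedup disappears entirely.
import Mathlib
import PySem

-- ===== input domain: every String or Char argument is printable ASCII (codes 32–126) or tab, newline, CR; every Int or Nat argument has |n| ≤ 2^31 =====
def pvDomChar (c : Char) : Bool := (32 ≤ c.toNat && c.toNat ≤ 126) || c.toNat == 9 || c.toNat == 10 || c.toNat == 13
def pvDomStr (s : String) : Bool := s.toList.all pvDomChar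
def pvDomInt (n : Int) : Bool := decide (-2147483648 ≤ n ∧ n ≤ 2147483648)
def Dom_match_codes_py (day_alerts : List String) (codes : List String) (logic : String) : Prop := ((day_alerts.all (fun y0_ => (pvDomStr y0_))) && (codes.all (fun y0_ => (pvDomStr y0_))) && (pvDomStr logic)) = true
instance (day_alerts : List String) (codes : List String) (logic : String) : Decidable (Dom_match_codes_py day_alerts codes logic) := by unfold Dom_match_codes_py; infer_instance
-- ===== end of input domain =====

-- B replaces A's two-stage design (normalize/dedupe a code list, then any/all over it)
-- by a single streaming pass that tests each token as it is produced and short-circuits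
-- with an early return, keeping only a 'seen a token' flag (objective: alternative).
-- (For a list argument, A's "value in (None, '')" guard is always False, so the
-- list branch of _normalize_codes is the one ported.)

-- ===== PORT A =====
def pvAppendToken (out : List String) (raw : String) : List String :=
  if raw = "" then out
  else
    let text := PySem.Str.strip raw
    if text = "" then out
    else
      let parts : List String :=
        if PySem.Str.isIn "," text then
          -- split? is some here since the separator "," is nonempty
          ((PySem.Str.split? text ",").getD []).map (fun p => PySem.Str.upper (PySem.Str.strip p))
        else [PySem.Str.upper text]
      parts.foldl (fun o code =>
        if code = "" then o else if o.contains code then o else o ++ [code]) out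

def pvNormalizeCodesA (codes : List String) : List String :=
  codes.foldl pvAppendToken []

def pvNormalizeLogicA (value : String) (dflt : String) : String :=
  let lg := PySem.Str.upper (PySem.Str.strip (if value = "" then dflt else value))
  if lg = "AND" ∨ lg = "OR" then lg else dflt

def match_codes_py (day_alerts : List String) (codes : List String) (logic : String) : Bool :=
  let cs := pvNormalizeCodesA codes
  if cs = [] then false
  else
    let lg := pvNormalizeLogicA logic "AND"
    if lg = "OR" then cs.any (fun c => day_alerts.contains c)
    else cs.all (fun c => day_alerts.contains c)

-- ===== PORT B =====
-- the (unfiltered) token list one raw entry yields, as in B's inner comprehension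
def pvPartsB (raw : String) : List String :=
  if raw = "" then []
  else
    let text := PySem.Str.strip raw
    if text = "" then []
    else
      if PySem.Str.isIn "," text then
        ((PySem.Str.split? text ",").getD []).map (fun p => PySem.Str.upper (PySem.Str.strip p))
      else [PySem.Str.upper text]

-- the inner 'for code in parts' loop: some r = early return, none = fall through with updated seen
def pvInnerB (day_alerts : List String) (isOr : Bool) : List String → Bool → Option Bool × Bool
  | [], seen => (none, seen)
  | c :: t, seen =>
    if c = "" then pvInnerB day_alerts isOr t seen
    else if day_alerts.contains c = isOr then (some isOr, true)
    else pvInnerB day_alerts isOr t true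

-- the outer 'for raw in codes' loop with the final return
def pvOuterB (day_alerts : List String) (isOr : Bool) : List String → Bool → Bool
  | [], seen => seen && !isOr
  | raw :: rest, seen =>
    match pvInnerB day_alerts isOr (pvPartsB raw) seen with
    | (some r, _) => r
    | (none, seen') => pvOuterB day_alerts isOr rest seen'

def match_codes_py_alt (day_alerts : List String) (codes : List String) (logic : String) : Bool :=
  let isOr := PySem.Str.upper (PySem.Str.strip (if logic = "" then "AND" else logic)) = "OR"
  pvOuterB day_alerts isOr codes false

-- ===== PRECONDITION & SPEC =====
def Spec_match_codes_py (day_alerts : List String) (codes : List String) (logic : String) (out : Bool) : Prop := out = match_codes_py_alt day_alerts codes logic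
instance (day_alerts : List String) (codes : List String) (logic : String) (out : Bool) : Decidable (Spec_match_codes_py day_alerts codes logic out) := by unfold Spec_match_codes_py; infer_instance

-- ===== CLAIM (what is proved, stated in full; the proofs are below) =====
def Claim_equal_match_codes_py : Prop := ∀ (day_alerts : List String) (codes : List String) (logic : String), Dom_match_codes_py day_alerts codes logic → Spec_match_codes_py day_alerts codes logic (match_codes_py day_alerts codes logic)

-- ===== LEMMAS AND PROOFS =====

-- the token stream of one raw entry, empties removed
def pvTokens (raw : String) : List String := (pvPartsB raw).filter (fun c => c ≠ "")

-- B's whole computation, flattened to one token list (proof-side characterisation)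
def pvScanFlat (day_alerts : List String) (isOr : Bool) : List String → Bool → Bool
  | [], seen => seen && !isOr
  | c :: t, _ => if day_alerts.contains c = isOr then isOr else pvScanFlat day_alerts isOr t true

-- A's per-raw append step builds exactly the Set.add fold over the filtered tokens
lemma pvFoldl_step_filter (parts : List String) (out : List String) :
    parts.foldl (fun o code =>
      if code = "" then o else if o.contains code then o else o ++ [code]) out
    = (parts.filter (fun c => c ≠ "")).foldl PySem.Set.add out := by
  induction parts generalizing out with
  | nil => rfl
  | cons c t ih =>
    by_cases hc : c = ""
    · simpa [hc] using ih out
    · have hstep : (if c = "" then out else if out.contains c then out else out ++ [c])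
          = PySem.Set.add out c := by
        simp [hc, PySem.Set.add, PySem.Set.contains]
      have hf : List.filter (fun c => c ≠ "") (c :: t)
          = c :: List.filter (fun c => c ≠ "") t := by simp [hc]
      rw [List.foldl_cons, hf, List.foldl_cons, hstep]
      exact ih _

lemma pvAppendToken_eq (out : List String) (raw : String) :
    pvAppendToken out raw = (pvTokens raw).foldl PySem.Set.add out := by
  unfold pvAppendToken pvTokens pvPartsB
  by_cases h1 : raw = ""
  · simp [h1]
  · by_cases h2 : PySem.Str.strip raw = ""
    · simp [h1, h2]
    · simp only [if_neg h1, if_neg h2]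
      exact pvFoldl_step_filter _ _

lemma pvNormalizeA_eq (codes : List String) :
    pvNormalizeCodesA codes = PySem.Set.ofList (codes.flatMap pvTokens) := by
  unfold pvNormalizeCodesA PySem.Set.ofList
  rw [List.flatMap, List.foldl_flatten, List.foldl_map]
  exact List.foldl_ext _ _ _ (fun o r _ => pvAppendToken_eq o r)

lemma pvLogicA_or_iff (s : String) :
    (pvNormalizeLogicA s "AND" = "OR")
      ↔ PySem.Str.upper (PySem.Str.strip (if s = "" then "AND" else s)) = "OR" := by
  unfold pvNormalizeLogicA
  set lg := PySem.Str.upper (PySem.Str.strip (if s = "" then "AND" else s)) with hl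
  by_cases h : lg = "AND" ∨ lg = "OR"
  · rw [if_pos h]
  · rw [if_neg h]
    constructor
    · intro hx; exact absurd hx (by decide)
    · intro hx; exact absurd (Or.inr hx) h

-- B's inner loop seen from the flat scan: an early return freezes the tail
lemma pvInner_scan (da : List String) (isOr : Bool) (parts l2 : List String) :
    ∀ seen, pvScanFlat da isOr ((parts.filter (fun c => c ≠ "")) ++ l2) seen
      = (match pvInnerB da isOr parts seen with
         | (some r, _) => r
         | (none, seen') => pvScanFlat da isOr l2 seen') := by
  induction parts with
  | nil => intro seen; rfl
  | cons c t ih =>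
    intro seen
    by_cases hc : c = ""
    · simpa [hc, pvInnerB] using ih seen
    · have hf : List.filter (fun c => c ≠ "") (c :: t)
          = c :: List.filter (fun c => c ≠ "") t := by simp [hc]
      rw [hf, List.cons_append]
      by_cases hm : da.contains c = isOr
      · rw [pvInnerB, if_neg hc, if_pos hm, pvScanFlat, if_pos hm]
      · rw [pvInnerB, if_neg hc, if_neg hm, pvScanFlat, if_neg hm]
        exact ih true

-- B's outer loop equals the flat scan over all tokens
lemma pvOuter_scan (da : List String) (isOr : Bool) (codes : List String) :
    ∀ seen, pvOuterB da isOr codes seen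
      = pvScanFlat da isOr (codes.flatMap pvTokens) seen := by
  induction codes with
  | nil => intro seen; rfl
  | cons raw rest ih =>
    intro seen
    rw [List.flatMap_cons]
    show pvOuterB da isOr (raw :: rest) seen
      = pvScanFlat da isOr ((pvPartsB raw).filter (fun c => c ≠ "") ++ rest.flatMap pvTokens) seen
    rw [pvInner_scan da isOr (pvPartsB raw) (rest.flatMap pvTokens) seen, pvOuterB]
    cases h : pvInnerB da isOr (pvPartsB raw) seen with
    | mk r seen' => cases r <;> simp [ih]

-- the flat scan is the usual any/all (with the seen flag only mattering on [])
lemma pvScanFlat_eq (da : List String) (isOr : Bool) (l : List String) :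
    ∀ seen, pvScanFlat da isOr l seen
      = if isOr then l.any (fun c => da.contains c)
        else (seen || !l.isEmpty) && l.all (fun c => da.contains c) := by
  induction l with
  | nil => intro seen; cases isOr <;> simp [pvScanFlat]
  | cons c t ih =>
    intro seen
    by_cases hm : da.contains c = isOr
    · cases isOr <;> simp_all [pvScanFlat]
    · cases isOr <;> simp_all [pvScanFlat]

-- any/all over the deduplicated list equal any/all over the raw token list
lemma pvAny_ofList (l : List String) (p : String → Bool) :
    (PySem.Set.ofList l).any p = l.any p := by
  rw [Bool.eq_iff_iff]
  simp only [List.any_eq_true, PySem.Set.mem_ofList]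

lemma pvAll_ofList (l : List String) (p : String → Bool) :
    (PySem.Set.ofList l).all p = l.all p := by
  rw [Bool.eq_iff_iff]
  simp only [List.all_eq_true, PySem.Set.mem_ofList]

lemma pvOfList_ne_nil (c : String) (t : List String) : PySem.Set.ofList (c :: t) ≠ [] := by
  rw [PySem.Set.ofList_cons]; exact List.cons_ne_nil _ _

-- ===== VERDICT (by name: the statement is the Claim_ definition above) =====
theorem match_codes_py_spec : Claim_equal_match_codes_py := by
  intro day_alerts codes logic _
  unfold Spec_match_codes_py match_codes_py match_codes_py_alt
  rw [pvNormalizeA_eq, pvOuter_scan, pvScanFlat_eq]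
  set flat := codes.flatMap pvTokens with hflat
  by_cases hN : flat = []
  · simp [hN, PySem.Set.ofList]
  · obtain ⟨c, t, hct⟩ : ∃ c t, flat = c :: t := by
      cases h : flat with
      | nil => exact absurd h hN
      | cons c t => exact ⟨c, t, rfl⟩
    have hcs : PySem.Set.ofList flat ≠ [] := hct ▸ pvOfList_ne_nil c t
    rw [if_neg hcs]
    by_cases hOr : PySem.Str.upper (PySem.Str.strip (if logic = "" then "AND" else logic)) = "OR"
    · rw [if_pos ((pvLogicA_or_iff logic).mpr hOr), pvAny_ofList]
      simp [hOr]
    · rw [if_neg (fun h => hOr ((pvLogicA_or_iff logic).mp h)), pvAll_ofList]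
      simp [hOr, hN]
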